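-- pv_equiv track=rewrite | github.com/sairelcabahaga05/Code-Challenge | challenge#22.py | checkStepNumbers
-- ===== SOURCE A (Python) =====
-- def checkStepNumbers(system_names, step_numbers):
--     system_steps = {}
--     for system, step in zip(system_names, step_numbers):
--         if system in system_steps:
--             if step <= system_steps[system][-1]:
--                 return False
--             system_steps[system].append(step)
--         else:
--             system_steps[system] = [step]
--     return True
-- ===== SOURCE B (Python) =====
-- def checkStepNumbers(system_names, step_numbers):
--     # All-pairs view: the steps of each system are strictly increasing
--     # iff every earlier occurrence of a name has a smaller step than
--     # every later occurrence of the same name.  No grouping, no dict.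
--     pairs = list(zip(system_names, step_numbers))
--     for i, (name, step) in enumerate(pairs):
--         for later_name, later_step in pairs[i + 1:]:
--             if name == later_name and step >= later_step:
--                 return False
--     return True
-- ===== Notes on version B (the rewrite author's own statement) =====
-- stated objective: alternative
-- what changed: A's fused dict-grouping pass with per-system last-step state is replaced by a stateless all-pairs comparison: B checks that every earlier occurrence of a name has a smaller step than every later occurrence of the same name, with no dictionary or grouping at all (correct because consecutive strict increase within a group is equivalent to pairwise strict increase); B trades A's O(n) time for a shorter, state-free quadratic scan.
import Mathlib
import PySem

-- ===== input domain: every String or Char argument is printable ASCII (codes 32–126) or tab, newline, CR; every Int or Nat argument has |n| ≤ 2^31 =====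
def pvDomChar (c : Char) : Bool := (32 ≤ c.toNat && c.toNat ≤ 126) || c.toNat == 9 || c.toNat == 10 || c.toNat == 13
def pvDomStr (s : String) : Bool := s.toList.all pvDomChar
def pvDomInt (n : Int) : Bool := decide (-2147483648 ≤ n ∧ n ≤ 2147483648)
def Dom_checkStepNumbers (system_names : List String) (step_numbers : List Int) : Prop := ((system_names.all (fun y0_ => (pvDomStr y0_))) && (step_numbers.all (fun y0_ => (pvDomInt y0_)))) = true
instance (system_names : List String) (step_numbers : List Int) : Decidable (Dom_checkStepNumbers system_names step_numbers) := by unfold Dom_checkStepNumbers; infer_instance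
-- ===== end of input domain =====

-- B replaces A's fused dict-grouping pass by a stateless all-pairs comparison (every earlier
-- occurrence of a name must carry a smaller step than every later one): alternative algorithm,
-- no dictionary, quadratic instead of linear.


-- ===== PORT A =====
-- the 'for system, step in zip(...)' loop with early 'return False', state = the dict system_steps
def goA : PySem.Dict String (List Int) → List (String × Int) → Bool
  | _, [] => true
  | d, (system, step) :: rest =>
    if d.contains system then
      match PySem.List.pyGet? (d.getD system []) (-1) with     -- system_steps[system][-1]
      | some lastv =>
          if step ≤ lastv then false
          else goA (d.insert system (d.getD system [] ++ [step])) rest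
      | none => false                                -- IndexError; unreachable: stored lists are nonempty
    else goA (d.insert system [step]) rest

def checkStepNumbers (system_names : List String) (step_numbers : List Int) : Bool :=
  goA PySem.Dict.empty (system_names.zip step_numbers)

-- ===== PORT B =====
-- the outer 'for i, (name, step) in enumerate(pairs)' with inner scan over pairs[i+1:]:
-- structurally, each element is compared against its tail, early 'return False' = short-circuit &&
def goB : List (String × Int) → Bool
  | [] => true
  | (name, step) :: rest =>
    (rest.all fun p => !(name == p.1 && step ≥ p.2)) && goB rest

def checkStepNumbers_alt (system_names : List String) (step_numbers : List Int) : Bool :=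
  goB (system_names.zip step_numbers)

-- ===== PRECONDITION & SPEC =====
def Spec_checkStepNumbers (system_names : List String) (step_numbers : List Int) (out : Bool) : Prop := out = checkStepNumbers_alt system_names step_numbers
instance (system_names : List String) (step_numbers : List Int) (out : Bool) : Decidable (Spec_checkStepNumbers system_names step_numbers out) := by unfold Spec_checkStepNumbers; infer_instance

-- ===== CLAIM (what is proved, stated in full; the proofs are below) =====
def Claim_equal_checkStepNumbers : Prop := ∀ (system_names : List String) (step_numbers : List Int), Dom_checkStepNumbers system_names step_numbers → Spec_checkStepNumbers system_names step_numbers (checkStepNumbers system_names step_numbers)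

-- ===== LEMMAS AND PROOFS =====

-- the steps of system k among the remaining pairs (proof-only notion)
def grp (k : String) (ps : List (String × Int)) : List Int :=
  (ps.filter (fun p => p.1 == k)).map (·.2)

-- 'steps strictly increase along a list' as A's loop maintains it (proof-only notion)
def incrPairs (steps : List Int) : Bool :=
  (steps.zip steps.tail).all (fun p => decide (p.1 < p.2))

theorem grp_cons_self (k : String) (st : Int) (rest : List (String × Int)) :
    grp k ((k, st) :: rest) = st :: grp k rest := by
  simp [grp]

theorem grp_cons_ne {k s : String} (h : k ≠ s) (st : Int) (rest : List (String × Int)) :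
    grp k ((s, st) :: rest) = grp k rest := by
  simp [grp, Ne.symm h]

theorem incrPairs_append_cons_last {l r : List Int} {st : Int} (hne : l ≠ [])
    (h : incrPairs (l ++ st :: r) = true) : l.getLast hne < st := by
  induction l with
  | nil => exact absurd rfl hne
  | cons a l ih =>
      cases l with
      | nil =>
          simp only [incrPairs, List.nil_append, List.cons_append, List.tail_cons,
            List.zip_cons_cons, List.all_cons, Bool.and_eq_true] at h
          simpa [List.getLast] using of_decide_eq_true h.1
      | cons b l =>
          have h' : incrPairs ((b :: l) ++ st :: r) = true := by
            simp only [incrPairs, List.cons_append, List.tail_cons, List.zip_cons_cons,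
              List.all_cons, Bool.and_eq_true] at h
            simpa [incrPairs] using h.2
          simpa [List.getLast] using ih (by simp) h'

theorem incrPairs_snoc {l : List Int} {st : Int} (hne : l ≠ [])
    (hincr : incrPairs l = true) (hlt : l.getLast hne < st) :
    incrPairs (l ++ [st]) = true := by
  induction l with
  | nil => exact absurd rfl hne
  | cons a t iht =>
      cases t with
      | nil =>
          simp only [List.getLast] at hlt
          simp [incrPairs, hlt]
      | cons b t =>
          simp only [incrPairs, List.cons_append, List.tail_cons, List.zip_cons_cons,
            List.all_cons, Bool.and_eq_true] at hincr ⊢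
          refine ⟨hincr.1, ?_⟩
          have := iht (by simp) (by simpa [incrPairs] using hincr.2)
            (by simpa [List.getLast] using hlt)
          simpa [incrPairs] using this

-- characterisation of A's loop: from a dict whose stored lists are nonempty and strictly increasing,
-- goA returns true iff every system's (stored ++ remaining) steps are strictly increasing
theorem goA_char (ps : List (String × Int)) :
    ∀ d : PySem.Dict String (List Int),
      (∀ k l, d.get? k = some l → l ≠ [] ∧ incrPairs l = true) →
      (goA d ps = true ↔ ∀ k, incrPairs (d.getD k [] ++ grp k ps) = true) := by
  induction ps with
  | nil =>
      intro d hinv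
      simp only [goA, grp, List.filter_nil, List.map_nil, List.append_nil, true_iff]
      intro k
      rcases hk : d.get? k with _ | l
      · simp [PySem.Dict.getD_of_get?_eq_none _ _ hk, incrPairs]
      · rw [PySem.Dict.getD_of_get?_eq_some _ _ hk]
        exact (hinv k l hk).2
  | cons p rest ih =>
      intro d hinv
      obtain ⟨s, st⟩ := p
      by_cases hc : d.contains s = true
      · -- system already present
        rcases hg : d.get? s with _ | lst
        · rw [PySem.Dict.contains_eq_isSome_get?, hg] at hc; simp at hc
        obtain ⟨hne, hincr⟩ := hinv s lst hg
        have hgetD : d.getD s [] = lst := PySem.Dict.getD_of_get?_eq_some _ _ hg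
        have hlast : PySem.List.pyGet? lst (-1) = some (lst.getLast hne) := by
          rw [PySem.List.pyGet?_neg_one, List.getLast?_eq_getLast_of_ne_nil hne]
        by_cases hle : st ≤ lst.getLast hne
        · -- A returns False; the group for s is not strictly increasing
          have : goA d ((s, st) :: rest) = false := by
            simp only [goA]
            rw [if_pos hc, hgetD, hlast]
            show (if st ≤ lst.getLast hne then false
                  else goA (d.insert s (lst ++ [st])) rest) = false
            rw [if_pos hle]
          rw [this]
          simp only [Bool.false_eq_true, false_iff]
          intro hall
          have := hall s
          rw [hgetD, grp_cons_self] at this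
          exact absurd (incrPairs_append_cons_last hne this) (not_lt.mpr hle)
        · -- A keeps going with lst ++ [st]
          have hstep : goA d ((s, st) :: rest) = goA (d.insert s (lst ++ [st])) rest := by
            simp only [goA]
            rw [if_pos hc, hgetD, hlast]
            show (if st ≤ lst.getLast hne then false
                  else goA (d.insert s (lst ++ [st])) rest) = goA (d.insert s (lst ++ [st])) rest
            rw [if_neg hle]
          rw [hstep]
          have hinv' : ∀ k l, (d.insert s (lst ++ [st])).get? k = some l →
              l ≠ [] ∧ incrPairs l = true := by
            intro k l hkl
            by_cases hks : k = s
            · subst hks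
              rw [PySem.Dict.get?_insert_self] at hkl
              cases hkl
              exact ⟨by simp, incrPairs_snoc hne hincr (lt_of_not_ge hle)⟩
            · rw [PySem.Dict.get?_insert_of_ne _ _ hks] at hkl
              exact hinv k l hkl
          rw [ih _ hinv']
          constructor <;> intro hall k
          · by_cases hks : k = s
            · subst hks
              have := hall k
              rw [PySem.Dict.getD_insert_self] at this
              rw [hgetD, grp_cons_self]
              simpa [List.append_assoc] using this
            · have := hall k
              rw [PySem.Dict.getD_insert_of_ne _ _ _ hks] at this
              rw [grp_cons_ne hks]
              exact this
          · by_cases hks : k = s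
            · subst hks
              have := hall k
              rw [hgetD, grp_cons_self] at this
              rw [PySem.Dict.getD_insert_self]
              simpa [List.append_assoc] using this
            · have := hall k
              rw [grp_cons_ne hks] at this
              rw [PySem.Dict.getD_insert_of_ne _ _ _ hks]
              exact this
      · -- fresh system
        have hcf : d.contains s = false := by simpa using hc
        have hg : d.get? s = none := by
          rw [PySem.Dict.contains_eq_isSome_get?] at hcf
          rcases h : d.get? s with _ | l
          · rfl
          · rw [h] at hcf; simp at hcf
        have hstep : goA d ((s, st) :: rest) = goA (d.insert s [st]) rest := by
          simp only [goA]
          rw [if_neg (by simp [hcf])]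
        rw [hstep]
        have hinv' : ∀ k l, (d.insert s [st]).get? k = some l → l ≠ [] ∧ incrPairs l = true := by
          intro k l hkl
          by_cases hks : k = s
          · subst hks
            rw [PySem.Dict.get?_insert_self] at hkl
            cases hkl
            exact ⟨by simp, by simp [incrPairs]⟩
          · rw [PySem.Dict.get?_insert_of_ne _ _ hks] at hkl
            exact hinv k l hkl
        rw [ih _ hinv']
        have hgetD : d.getD s [] = [] := PySem.Dict.getD_of_get?_eq_none _ _ hg
        constructor <;> intro hall k
        · by_cases hks : k = s
          · subst hks
            have := hall k
            rw [PySem.Dict.getD_insert_self] at this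
            rw [hgetD, grp_cons_self]
            simpa using this
          · have := hall k
            rw [PySem.Dict.getD_insert_of_ne _ _ _ hks] at this
            rw [grp_cons_ne hks]
            exact this
        · by_cases hks : k = s
          · subst hks
            have := hall k
            rw [hgetD, grp_cons_self] at this
            rw [PySem.Dict.getD_insert_self]
            simpa using this
          · have := hall k
            rw [grp_cons_ne hks] at this
            rw [PySem.Dict.getD_insert_of_ne _ _ _ hks]
            exact this

-- incrPairs is pairwise strict increase (consecutive ⇔ all pairs, by transitivity of <)
theorem incrPairs_iff_pairwise (l : List Int) :
    incrPairs l = true ↔ List.Pairwise (· < ·) l := by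
  rw [← List.isChain_iff_pairwise]
  induction l with
  | nil => simp [incrPairs]
  | cons a t ih =>
      cases t with
      | nil => simp [incrPairs]
      | cons b t =>
          simp only [incrPairs, List.tail_cons, List.zip_cons_cons, List.all_cons,
            Bool.and_eq_true, List.isChain_cons_cons, decide_eq_true_eq] at ih ⊢
          rw [← ih]

-- membership in a group
theorem mem_grp {x : Int} {k : String} {ps : List (String × Int)} :
    x ∈ grp k ps ↔ ∃ p ∈ ps, p.1 = k ∧ p.2 = x := by
  simp only [grp, List.mem_map, List.mem_filter, beq_iff_eq]
  constructor
  · rintro ⟨p, ⟨hp, hk⟩, hx⟩; exact ⟨p, hp, hk, hx⟩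
  · rintro ⟨p, hp, hk, hx⟩; exact ⟨p, ⟨hp, hk⟩, hx⟩

-- the all-pairs relation B checks
def Rp (p q : String × Int) : Prop := p.1 = q.1 → p.2 < q.2

-- B's pairwise condition on the flat list ⇔ every group is pairwise increasing
theorem pairwise_iff_groups (ps : List (String × Int)) :
    List.Pairwise Rp ps ↔ ∀ k, List.Pairwise (· < ·) (grp k ps) := by
  induction ps with
  | nil => simp [grp]
  | cons p rest ih =>
      obtain ⟨n, s⟩ := p
      rw [List.pairwise_cons, ih]
      constructor
      · rintro ⟨hhead, hrest⟩ k
        by_cases hk : k = n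
        · subst hk
          rw [grp_cons_self, List.pairwise_cons]
          refine ⟨?_, hrest k⟩
          intro x hx
          obtain ⟨q, hq, hq1, hq2⟩ := mem_grp.mp hx
          subst hq2
          exact hhead q hq hq1.symm
        · rw [grp_cons_ne hk]
          exact hrest k
      · intro hall
        constructor
        · intro q hq hq1
          have := hall n
          rw [grp_cons_self, List.pairwise_cons] at this
          exact this.1 q.2 (mem_grp.mpr ⟨q, hq, hq1.symm, rfl⟩)
        · intro k
          by_cases hk : k = n
          · subst hk
            have := hall k
            rw [grp_cons_self, List.pairwise_cons] at this
            exact this.2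
          · have := hall k
            rwa [grp_cons_ne hk] at this

-- characterisation of B's loop
theorem goB_char (ps : List (String × Int)) : goB ps = true ↔ List.Pairwise Rp ps := by
  induction ps with
  | nil => simp [goB]
  | cons p rest ih =>
      obtain ⟨n, s⟩ := p
      simp only [goB, Bool.and_eq_true, List.all_eq_true, List.pairwise_cons, ih]
      constructor
      · rintro ⟨hhead, hrest⟩
        refine ⟨?_, hrest⟩
        intro q hq hq1
        have := hhead q hq
        simp only [Bool.not_eq_true', Bool.and_eq_false_iff, beq_eq_false_iff_ne,
          decide_eq_false_iff_not, not_le] at this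
        rcases this with h | h
        · exact absurd hq1 h
        · exact h
      · rintro ⟨hhead, hrest⟩
        refine ⟨?_, hrest⟩
        intro q hq
        by_cases hq1 : n = q.1
        · have := hhead q hq hq1
          simp [hq1, not_le.mpr this]
        · simp [hq1]

-- ===== VERDICT (by name: the statement is the Claim_ definition above) =====
theorem checkStepNumbers_spec : Claim_equal_checkStepNumbers := by
  intro system_names step_numbers _
  unfold Spec_checkStepNumbers
  have hA := goA_char (system_names.zip step_numbers) PySem.Dict.empty
    (by intro k l h; rw [PySem.Dict.get?_empty] at h; cases h)
  simp only [PySem.Dict.getD_empty, List.nil_append] at hA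
  have hB : checkStepNumbers_alt system_names step_numbers = true ↔
      ∀ k, incrPairs (grp k (system_names.zip step_numbers)) = true := by
    unfold checkStepNumbers_alt
    rw [goB_char, pairwise_iff_groups]
    exact forall_congr' fun k => (incrPairs_iff_pairwise _).symm
  rcases hb : checkStepNumbers_alt system_names step_numbers with _ | _
  · rcases ha : checkStepNumbers system_names step_numbers with _ | _
    · rfl
    · exact absurd (hB.mpr (hA.mp (by simpa [checkStepNumbers] using ha))) (by simp [hb])
  · simpa [checkStepNumbers] using hA.mpr (hB.mp hb)
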